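-- pv_equiv track=rewrite | github.com/Mozinapig/Math_module | 数据预处理/数据清洗/缺失值处理/拉格朗日插值.py | get_li_denominator
-- ===== SOURCE A (Python) =====
-- def get_li_denominator(list_x):
--     """ 计算li(x)的分母部分 """
--     denominator = [1 for _ in range(0, len(list_x))]  # 初始化分母列表，全置为1
--     for i in list(range(0, len(list_x))):
--         for j in list(range(0, len(list_x))):
--             # 循环计算到自己时，跳过此次循环
--             if j == i:
--                 continue
--             value_item = list_x[i] - list_x[j]
--             denominator[i] = denominator[i] * value_item
--     return denominator
-- ===== SOURCE B (Python) =====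
-- def get_li_denominator(list_x):
--     """ 计算li(x)的分母部分 """
--     n = len(list_x)
--     denominator = [1] * n
--     # one triangular pass over unordered pairs: each difference is computed
--     # once and contributes to both entries (antisymmetry: a-b == -(b-a))
--     for i in range(n):
--         for j in range(i + 1, n):
--             value = list_x[i] - list_x[j]
--             denominator[i] *= value
--             denominator[j] *= -value
--     return denominator
-- ===== Notes on version B (the rewrite author's own statement) =====
-- stated objective: alternative
-- what changed: Replaces the full n^2 scan (each difference computed twice, with a skip at j==i) by a single triangular pass over unordered pairs i<j that computes each difference once and multiplies it into both running products, exploiting antisymmetry a-b == -(b-a).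
import Mathlib
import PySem

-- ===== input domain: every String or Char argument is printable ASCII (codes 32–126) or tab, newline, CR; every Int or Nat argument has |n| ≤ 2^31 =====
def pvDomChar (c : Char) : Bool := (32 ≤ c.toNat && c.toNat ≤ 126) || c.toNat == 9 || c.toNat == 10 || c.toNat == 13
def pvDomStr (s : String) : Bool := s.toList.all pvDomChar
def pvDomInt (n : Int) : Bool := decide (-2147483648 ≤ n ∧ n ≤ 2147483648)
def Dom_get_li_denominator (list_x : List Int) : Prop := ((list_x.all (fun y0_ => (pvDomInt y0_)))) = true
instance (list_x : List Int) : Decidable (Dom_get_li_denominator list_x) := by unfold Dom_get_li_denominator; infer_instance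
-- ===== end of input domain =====

-- B replaces A's full n^2 scan by one triangular pass over pairs i<j, computing each
-- difference once and multiplying it into both running products (antisymmetry).

-- ===== PORT A =====
-- all list indices below are produced by range(0, len(list_x)), hence in range:
-- getD is exact for Python's list_x[i] here
def get_li_denominator (list_x : List Int) : List Int :=
  let denominator := (List.range list_x.length).map (fun _ => (1 : Int))
  (List.range list_x.length).foldl (fun den i =>
    (List.range list_x.length).foldl (fun den j =>
      if j = i then den
      else den.set i (den.getD i 1 * (list_x.getD i 0 - list_x.getD j 0))) den)
    denominator

-- ===== PORT B =====
def get_li_denominator_alt (list_x : List Int) : List Int :=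
  let n := list_x.length
  let denominator := List.replicate n (1 : Int)
  (List.range n).foldl (fun den i =>
    (List.range' (i + 1) (n - (i + 1))).foldl (fun den j =>
      let v := list_x.getD i 0 - list_x.getD j 0
      let den := den.set i (den.getD i 1 * v)
      den.set j (den.getD j 1 * (-v))) den)
    denominator

-- ===== PRECONDITION & SPEC =====
def Spec_get_li_denominator (list_x : List Int) (out : List Int) : Prop := out = get_li_denominator_alt list_x
instance (list_x : List Int) (out : List Int) : Decidable (Spec_get_li_denominator list_x out) := by unfold Spec_get_li_denominator; infer_instance

-- ===== CLAIM (what is proved, stated in full; the proofs are below) =====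
def Claim_equal_get_li_denominator : Prop := ∀ (list_x : List Int), Dom_get_li_denominator list_x → Spec_get_li_denominator list_x (get_li_denominator list_x)

-- ===== LEMMAS AND PROOFS =====

-- A's inner-loop body for a fixed row i
def stepA (xs : List Int) (i : Nat) (den : List Int) (j : Nat) : List Int :=
  if j = i then den else den.set i (den.getD i 1 * (xs.getD i 0 - xs.getD j 0))

-- A's inner loop over a list L of candidate j's, for a fixed row i
def innA (xs : List Int) (i : Nat) (den : List Int) (L : List Nat) : List Int :=
  L.foldl (stepA xs i) den

-- A's outer loop over a list I of rows
def outA (xs : List Int) (den : List Int) (I : List Nat) : List Int :=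
  I.foldl (fun den i => innA xs i den (List.range xs.length)) den

-- B's inner-loop body
def stepB (xs : List Int) (i : Nat) (den : List Int) (j : Nat) : List Int :=
  let v := xs.getD i 0 - xs.getD j 0
  let den := den.set i (den.getD i 1 * v)
  den.set j (den.getD j 1 * (-v))

-- B's inner loop
def innB (xs : List Int) (i : Nat) (den : List Int) (L : List Nat) : List Int :=
  L.foldl (stepB xs i) den

-- B's outer loop
def outB (xs : List Int) (den : List Int) (I : List Nat) : List Int :=
  I.foldl (fun den i => innB xs i den (List.range' (i + 1) (xs.length - (i + 1)))) den

lemma portA_eq (xs : List Int) :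
    get_li_denominator xs = outA xs ((List.range xs.length).map (fun _ => (1 : Int))) (List.range xs.length) := rfl

lemma portB_eq (xs : List Int) :
    get_li_denominator_alt xs = outB xs (List.replicate xs.length (1 : Int)) (List.range xs.length) := rfl

lemma innA_cons (xs : List Int) (i j : Nat) (L : List Nat) (den : List Int) :
    innA xs i den (j :: L) = innA xs i (stepA xs i den j) L := rfl

lemma innB_cons (xs : List Int) (i j : Nat) (L : List Nat) (den : List Int) :
    innB xs i den (j :: L) = innB xs i (stepB xs i den j) L := rfl

lemma stepA_length (xs : List Int) (i j : Nat) (den : List Int) :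
    (stepA xs i den j).length = den.length := by
  unfold stepA; split <;> simp

lemma stepB_length (xs : List Int) (i j : Nat) (den : List Int) :
    (stepB xs i den j).length = den.length := by
  simp [stepB]

lemma innA_length (xs : List Int) (i : Nat) (L : List Nat) (den : List Int) :
    (innA xs i den L).length = den.length := by
  induction L generalizing den with
  | nil => rfl
  | cons j L ih => rw [innA_cons, ih, stepA_length]

lemma innB_length (xs : List Int) (i : Nat) (L : List Nat) (den : List Int) :
    (innB xs i den L).length = den.length := by
  induction L generalizing den with
  | nil => rfl
  | cons j L ih => rw [innB_cons, ih, stepB_length]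

lemma getD_set_self (l : List Int) (i : Nat) (a : Int) (h : i < l.length) :
    (l.set i a).getD i 1 = a := by
  simp [List.getD, h]

lemma getD_set_ne (l : List Int) (i t : Nat) (a : Int) (h : t ≠ i) :
    (l.set i a).getD t 1 = l.getD t 1 := by
  simp [List.getD, List.getElem?_set_ne (by omega : i ≠ t)]

lemma innA_getD (xs : List Int) (i : Nat) (L : List Nat) (den : List Int)
    (hi : i < den.length) (t : Nat) :
    (innA xs i den L).getD t 1 =
      if t = i then
        den.getD i 1 * ((L.filter (fun j => j ≠ i)).map (fun j => xs.getD i 0 - xs.getD j 0)).prod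
      else den.getD t 1 := by
  induction L generalizing den with
  | nil =>
    by_cases ht : t = i
    · subst ht; simp [innA]
    · simp [innA, ht]
  | cons j L ih =>
    rw [innA_cons]
    by_cases hj : j = i
    · rw [show stepA xs i den j = den from by simp [stepA, hj]]
      rw [ih den hi]
      simp [hj]
    · have hstep : stepA xs i den j = den.set i (den.getD i 1 * (xs.getD i 0 - xs.getD j 0)) := by
        simp [stepA, hj]
      rw [hstep]
      set den' := den.set i (den.getD i 1 * (xs.getD i 0 - xs.getD j 0)) with hden'
      have hlen : i < den'.length := by simp [hden']; omega
      rw [ih den' hlen]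
      by_cases ht : t = i
      · subst ht
        rw [if_pos rfl, if_pos rfl, getD_set_self _ _ _ hi]
        simp [hj, mul_assoc]
      · rw [if_neg ht, if_neg ht, hden', getD_set_ne _ _ _ _ ht]

lemma innB_getD (xs : List Int) (i : Nat) (L : List Nat) (den : List Int)
    (hi : i < den.length) (hL : ∀ j ∈ L, j < den.length ∧ j ≠ i) (hnd : L.Nodup) (t : Nat) :
    (innB xs i den L).getD t 1 =
      if t = i then den.getD i 1 * (L.map (fun j => xs.getD i 0 - xs.getD j 0)).prod
      else if t ∈ L then den.getD t 1 * (-(xs.getD i 0 - xs.getD t 0))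
      else den.getD t 1 := by
  induction L generalizing den with
  | nil =>
    by_cases ht : t = i
    · subst ht; simp [innB]
    · simp [innB, ht]
  | cons j L ih =>
    obtain ⟨hjlen, hji⟩ := hL j (List.mem_cons_self ..)
    have hnd' : L.Nodup := hnd.of_cons
    have hjL : j ∉ L := by simp [List.nodup_cons] at hnd; exact hnd.1
    rw [innB_cons]
    set v := xs.getD i 0 - xs.getD j 0 with hv
    have hstep : stepB xs i den j =
        (den.set i (den.getD i 1 * v)).set j
          (((den.set i (den.getD i 1 * v)).getD j 1) * (-v)) := rfl
    set den1 := den.set i (den.getD i 1 * v) with hden1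
    set den2 := den1.set j (den1.getD j 1 * (-v)) with hden2
    rw [hstep]
    have h2len : den2.length = den.length := by simp [hden2, hden1]
    have hi2 : i < den2.length := by omega
    have hL2 : ∀ a ∈ L, a < den2.length ∧ a ≠ i := fun a ha => by
      obtain ⟨h1, h2⟩ := hL a (List.mem_cons_of_mem _ ha); exact ⟨by omega, h2⟩
    rw [ih den2 hi2 hL2 hnd']
    have hd2i : den2.getD i 1 = den.getD i 1 * v := by
      rw [hden2, getD_set_ne _ _ _ _ hji.symm, hden1, getD_set_self _ _ _ hi]
    have hd2j : den2.getD j 1 = den.getD j 1 * (-v) := by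
      rw [hden2, getD_set_self _ _ _ (by simp [hden1]; omega),
          hden1, getD_set_ne _ _ _ _ hji]
    have hd2o : ∀ s, s ≠ i → s ≠ j → den2.getD s 1 = den.getD s 1 := fun s h1 h2 => by
      rw [hden2, getD_set_ne _ _ _ _ h2, hden1, getD_set_ne _ _ _ _ h1]
    by_cases ht : t = i
    · subst ht; rw [if_pos rfl, if_pos rfl, hd2i, List.map_cons, List.prod_cons, mul_assoc]
    · rw [if_neg ht, if_neg ht]
      by_cases htj : t = j
      · subst htj
        rw [if_neg (by simpa using hjL), if_pos (List.mem_cons_self ..), hd2j]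
      · rw [hd2o t ht htj]
        by_cases htL : t ∈ L
        · rw [if_pos htL, if_pos (List.mem_cons_of_mem _ htL)]
        · rw [if_neg htL, if_neg (by simp [htj, htL])]

-- the full-row product A multiplies into entry t
def rowA (xs : List Int) (t : Nat) : Int :=
  (((List.range xs.length).filter (fun j => j ≠ t)).map
    (fun j => xs.getD t 0 - xs.getD j 0)).prod

-- the factor B's outer iteration i contributes to entry t
def colB (xs : List Int) (i t : Nat) : Int :=
  if t = i then
    ((List.range' (i + 1) (xs.length - (i + 1))).map (fun j => xs.getD i 0 - xs.getD j 0)).prod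
  else if i < t ∧ t < xs.length then -(xs.getD i 0 - xs.getD t 0)
  else 1

lemma outA_cons (xs : List Int) (i : Nat) (I : List Nat) (den : List Int) :
    outA xs den (i :: I) = outA xs (innA xs i den (List.range xs.length)) I := rfl

lemma outB_cons (xs : List Int) (i : Nat) (I : List Nat) (den : List Int) :
    outB xs den (i :: I) = outB xs (innB xs i den (List.range' (i + 1) (xs.length - (i + 1)))) I := rfl

lemma outA_length (xs : List Int) (I : List Nat) (den : List Int) :
    (outA xs den I).length = den.length := by
  induction I generalizing den with
  | nil => rfl
  | cons i I ih => rw [outA_cons, ih, innA_length]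

lemma outB_length (xs : List Int) (I : List Nat) (den : List Int) :
    (outB xs den I).length = den.length := by
  induction I generalizing den with
  | nil => rfl
  | cons i I ih => rw [outB_cons, ih, innB_length]

lemma outA_getD (xs : List Int) (I : List Nat) (den : List Int)
    (hlen : den.length = xs.length) (hI : ∀ i ∈ I, i < xs.length) (hnd : I.Nodup) (t : Nat) :
    (outA xs den I).getD t 1 =
      if t ∈ I then den.getD t 1 * rowA xs t else den.getD t 1 := by
  induction I generalizing den with
  | nil => simp [outA]
  | cons i I ih =>
    have hi : i < xs.length := hI i (List.mem_cons_self ..)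
    have hiI : i ∉ I := by simp [List.nodup_cons] at hnd; exact hnd.1
    rw [outA_cons]
    set den1 := innA xs i den (List.range xs.length) with hden1
    have h1len : den1.length = xs.length := by rw [hden1, innA_length, hlen]
    rw [ih den1 h1len (fun a ha => hI a (List.mem_cons_of_mem _ ha)) hnd.of_cons]
    have hrow : ∀ s, den1.getD s 1 =
        if s = i then den.getD i 1 * rowA xs i else den.getD s 1 := fun s => by
      rw [hden1, innA_getD xs i _ den (by omega) s]; rfl
    by_cases ht : t = i
    · subst ht
      rw [if_neg hiI, if_pos (List.mem_cons_self ..), hrow t, if_pos rfl]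
    · rw [hrow t, if_neg ht]
      by_cases htI : t ∈ I
      · rw [if_pos htI, if_pos (List.mem_cons_of_mem _ htI)]
      · rw [if_neg htI, if_neg (by simp [ht, htI])]

lemma outB_getD (xs : List Int) (I : List Nat) (den : List Int)
    (hlen : den.length = xs.length) (hI : ∀ i ∈ I, i < xs.length) (t : Nat) :
    (outB xs den I).getD t 1 = den.getD t 1 * (I.map (fun i => colB xs i t)).prod := by
  induction I generalizing den with
  | nil => simp [outB]
  | cons i I ih =>
    have hi : i < xs.length := hI i (List.mem_cons_self ..)
    rw [outB_cons]
    set L := List.range' (i + 1) (xs.length - (i + 1)) with hLdef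
    set den1 := innB xs i den L with hden1
    have h1len : den1.length = xs.length := by rw [hden1, innB_length, hlen]
    rw [ih den1 h1len (fun a ha => hI a (List.mem_cons_of_mem _ ha))]
    have hmem : ∀ j, j ∈ L ↔ i < j ∧ j < xs.length := fun j => by
      rw [hLdef, List.mem_range'_1]; omega
    have hstep : den1.getD t 1 = den.getD t 1 * colB xs i t := by
      rw [hden1, innB_getD xs i L den (by rw [hlen]; exact hi)
        (fun j hj => by
          obtain ⟨ha, hb⟩ := (hmem j).1 hj
          exact ⟨by rw [hlen]; exact hb, by omega⟩)
        (by rw [hLdef]; exact List.nodup_range' ..) t]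
      unfold colB
      by_cases ht : t = i
      · subst ht; rw [if_pos rfl, if_pos rfl, hLdef]
      · rw [if_neg ht, if_neg ht]
        by_cases htL : t ∈ L
        · rw [if_pos htL, if_pos ((hmem t).1 htL)]
        · rw [if_neg htL, if_neg (fun h => htL ((hmem t).2 h)), mul_one]
    rw [List.map_cons, List.prod_cons, hstep, mul_assoc]

-- key arithmetic fact: the row product equals the product of B's per-iteration factors
lemma rowA_eq_colB_prod (xs : List Int) (t : Nat) (ht : t < xs.length) :
    rowA xs t = ((List.range xs.length).map (fun i => colB xs i t)).prod := by
  have hsplit : List.range xs.length =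
      List.range' 0 t ++ t :: List.range' (t + 1) (xs.length - (t + 1)) := by
    calc List.range xs.length = List.range' 0 xs.length := List.range_eq_range'
      _ = List.range' 0 (t + (xs.length - t)) := by rw [show t + (xs.length - t) = xs.length from by omega]
      _ = List.range' 0 t ++ List.range' (0 + 1 * t) (xs.length - t) := List.range'_append.symm
      _ = List.range' 0 t ++ t :: List.range' (t + 1) (xs.length - (t + 1)) := by
          rw [show xs.length - t = (xs.length - (t + 1)) + 1 from by omega, List.range'_succ]
          norm_num
  have hfilter1 : (List.range' 0 t).filter (fun j => j ≠ t) = List.range' 0 t := by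
    rw [List.filter_eq_self]
    intro a ha
    have h := List.mem_range'_1.1 ha
    simp only [ne_eq, decide_eq_true_eq]
    omega
  have hfilter2 : (List.range' (t + 1) (xs.length - (t + 1))).filter (fun j => j ≠ t) =
      List.range' (t + 1) (xs.length - (t + 1)) := by
    rw [List.filter_eq_self]
    intro a ha
    have h := List.mem_range'_1.1 ha
    simp only [ne_eq, decide_eq_true_eq]
    omega
  have hfilter3 : (t :: List.range' (t + 1) (xs.length - (t + 1))).filter (fun j => j ≠ t) =
      List.range' (t + 1) (xs.length - (t + 1)) := by
    rw [List.filter_cons, if_neg (by simp)]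
    exact hfilter2
  unfold rowA
  rw [hsplit, List.filter_append, hfilter1, hfilter3, List.map_append, List.prod_append,
    List.map_append, List.prod_append, List.map_cons, List.prod_cons]
  have h1 : (List.range' 0 t).map (fun i => colB xs i t) =
      (List.range' 0 t).map (fun j => xs.getD t 0 - xs.getD j 0) := by
    apply List.map_congr_left
    intro i hi
    have h := List.mem_range'_1.1 hi
    simp only [zero_add] at h
    unfold colB
    rw [if_neg (by omega), if_pos ⟨by omega, ht⟩, neg_sub]
  have h2 : ((List.range' (t + 1) (xs.length - (t + 1))).map (fun i => colB xs i t)).prod = 1 := by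
    apply List.prod_eq_one
    intro x hx
    simp only [List.mem_map] at hx
    obtain ⟨i, hi, rfl⟩ := hx
    have h := List.mem_range'_1.1 hi
    unfold colB
    rw [if_neg (by omega), if_neg (fun h' => absurd h'.1 (by omega))]
  have h3 : colB xs t t =
      ((List.range' (t + 1) (xs.length - (t + 1))).map (fun j => xs.getD t 0 - xs.getD j 0)).prod := by
    unfold colB
    rw [if_pos rfl]
  rw [h1, h2, h3, mul_one]

-- first-row helpers: initial lists are all ones
lemma getD_initA (n t : Nat) : (((List.range n).map (fun _ => (1:Int))).getD t 1) = 1 := by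
  rcases lt_or_ge t n with h | h
  · simp [List.getD]
  · have h' : ((List.range n).map (fun _ => (1:Int))).length ≤ t := by simpa using h
    rw [List.getD, List.getElem?_eq_none h']
    rfl

lemma getD_initB (n t : Nat) : ((List.replicate n (1:Int)).getD t 1) = 1 := by
  rcases lt_or_ge t n with h | h
  · simp [List.getD, h]
  · have h' : (List.replicate n (1:Int)).length ≤ t := by simpa using h
    rw [List.getD, List.getElem?_eq_none h']
    rfl

-- ===== VERDICT (by name: the statement is the Claim_ definition above) =====
theorem get_li_denominator_spec : Claim_equal_get_li_denominator := by
  intro xs _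
  unfold Spec_get_li_denominator
  rw [portA_eq, portB_eq]
  have hlenA : (outA xs ((List.range xs.length).map (fun _ => (1:Int))) (List.range xs.length)).length = xs.length := by
    rw [outA_length]; simp
  have hlenB : (outB xs (List.replicate xs.length (1:Int)) (List.range xs.length)).length = xs.length := by
    rw [outB_length]; simp
  apply List.ext_getElem (by rw [hlenA, hlenB])
  intro t h1 h2
  have ht : t < xs.length := by omega
  have hA := outA_getD xs (List.range xs.length) ((List.range xs.length).map (fun _ => (1:Int))) (by simp)
    (fun i hi => List.mem_range.1 hi) (List.nodup_range) t
  have hB := outB_getD xs (List.range xs.length) (List.replicate xs.length (1:Int)) (by simp)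
    (fun i hi => List.mem_range.1 hi) t
  have hAd : (outA xs ((List.range xs.length).map (fun _ => (1:Int))) (List.range xs.length)).getD t 1 =
      (outA xs ((List.range xs.length).map (fun _ => (1:Int))) (List.range xs.length))[t] :=
    List.getD_eq_getElem _ 1 h1
  have hBd : (outB xs (List.replicate xs.length (1:Int)) (List.range xs.length)).getD t 1 =
      (outB xs (List.replicate xs.length (1:Int)) (List.range xs.length))[t] :=
    List.getD_eq_getElem _ 1 h2
  rw [← hAd, ← hBd, hA, hB, if_pos (List.mem_range.2 ht), getD_initA, getD_initB,
    one_mul, one_mul, rowA_eq_colB_prod xs t ht]
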